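-- pv_equiv track=rewrite | github.com/amirhajibabaei/AutoForce | theforce/util/analysis.py | get_exponential_deltas
-- ===== SOURCE A (Python) =====
-- def get_exponential_deltas(start, stop, n=6):
--     i = stop-start
--     j = 1
--     k = 0
--     while j < i:
--         j *= 2
--         k += 1
--     deltas = [2**(k-j-2) for j in range(0, n)][::-1]
--     return [t for t in deltas if t > 1]
-- ===== SOURCE B (Python) =====
-- def get_exponential_deltas(start, stop, n=6):
--     # k = ceil(log2(stop-start)) for differences > 1, else 0 (same as A's doubling loop)
--     i = stop - start
--     k = (i - 1).bit_length() if i > 1 else 0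
--     # A's reversed comprehension + filter keeps exactly 2**e for ascending e in [max(1, k-n-1), k-2]
--     return [2 ** e for e in range(max(1, k - n - 1), k - 1)]
-- ===== Notes on version B (the rewrite author's own statement) =====
-- stated objective: faster
-- what changed: The doubling while-loop is replaced by a closed-form bit_length computation of k, and instead of building an n-element list, reversing and filtering it, B directly generates the surviving ascending power-of-two range [2**max(1,k-n-1), ..., 2**(k-2)].
import Mathlib
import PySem

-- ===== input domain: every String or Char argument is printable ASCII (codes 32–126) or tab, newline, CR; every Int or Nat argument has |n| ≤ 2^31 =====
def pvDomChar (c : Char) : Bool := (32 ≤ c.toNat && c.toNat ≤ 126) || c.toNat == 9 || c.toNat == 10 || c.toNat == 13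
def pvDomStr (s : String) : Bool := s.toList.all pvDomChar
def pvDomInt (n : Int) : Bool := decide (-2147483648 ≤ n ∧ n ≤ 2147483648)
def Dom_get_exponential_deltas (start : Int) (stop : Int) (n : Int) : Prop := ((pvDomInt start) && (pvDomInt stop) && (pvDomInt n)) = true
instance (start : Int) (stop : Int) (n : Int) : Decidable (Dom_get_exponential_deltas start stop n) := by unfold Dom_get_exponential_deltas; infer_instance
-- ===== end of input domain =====

-- B replaces A's doubling `while` loop by a closed-form bit_length and builds only the surviving
-- ascending power-of-two range directly (no n-length list, no reverse, no filter): simpler/faster for large n.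

-- ===== PORT A =====
-- `while j < i: j *= 2; k += 1` — fuel only makes the loop total; (stop-start).toNat + 1 steps
-- always suffice because j starts at 1 and at least doubles every step.
def pvLoopA : Nat → Int → Int → Int → Int
  | 0, _, _, k => k
  | fuel+1, i, j, k => if j < i then pvLoopA fuel i (j*2) (k+1) else k

-- Python's 2**e is a float in (0,1) for e < 0 and the int 1 for e = 0; every such value fails the
-- final `t > 1` filter, so representing negative-exponent powers by 0 (also ≤ 1) is exact for the result.
def pvPow2 (e : Int) : Int := if 0 ≤ e then 2 ^ e.toNat else 0

def get_exponential_deltas (start : Int) (stop : Int) (n : Int) : List Int :=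
  let i := stop - start
  let k := pvLoopA (i.toNat + 1) i 1 0
  let deltas := ((PySem.List.pyRange 0 n 1).map (fun j => pvPow2 (k - j - 2))).reverse
  deltas.filter (fun t => decide (1 < t))

-- ===== PORT B =====
def get_exponential_deltas_alt (start : Int) (stop : Int) (n : Int) : List Int :=
  let i := stop - start
  let k : Int := if 1 < i then (PySem.Int.bitLength (i - 1) : Int) else 0
  (PySem.List.pyRange (max 1 (k - n - 1)) (k - 1) 1).map (fun e => 2 ^ e.toNat)

-- ===== PRECONDITION & SPEC =====
def Spec_get_exponential_deltas (start : Int) (stop : Int) (n : Int) (out : List Int) : Prop := out = get_exponential_deltas_alt start stop n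
instance (start : Int) (stop : Int) (n : Int) (out : List Int) : Decidable (Spec_get_exponential_deltas start stop n out) := by unfold Spec_get_exponential_deltas; infer_instance

-- ===== CLAIM (what is proved, stated in full; the proofs are below) =====
def Claim_equal_get_exponential_deltas : Prop := ∀ (start : Int) (stop : Int) (n : Int), Dom_get_exponential_deltas start stop n → Spec_get_exponential_deltas start stop n (get_exponential_deltas start stop n)

-- ===== LEMMAS AND PROOFS =====

-- Python's k for difference i, as B computes it (a Nat; 0 for i ≤ 1)
def pvK (i : Int) : Nat := if 1 < i then PySem.Int.bitLength (i - 1) else 0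

lemma pvK_le (i : Int) (m : Nat) (h : i ≤ 2 ^ m) : pvK i ≤ m := by
  unfold pvK
  split
  · rename_i hi
    by_contra hgt
    rw [Nat.not_le] at hgt
    have hne : i - 1 ≠ 0 := by omega
    have h2 := PySem.Int.two_pow_bitLength_le (i - 1) hne
    have habs : (i - 1).natAbs = (i - 1).toNat := by omega
    have hmle : 2 ^ m ≤ 2 ^ (PySem.Int.bitLength (i - 1) - 1) :=
      Nat.pow_le_pow_right (by norm_num) (by omega)
    have : (2 ^ m : Int) ≤ ((i - 1).natAbs : Int) := by exact_mod_cast le_trans hmle h2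
    have : ((2:Int) ^ m) ≤ i - 1 := by omega
    have : (2:Int) ^ m = ((2 ^ m : Nat) : Int) := by push_cast; ring
    omega
  · exact Nat.zero_le m

lemma pvK_gt (i : Int) (m : Nat) (h : (2:Int) ^ m < i) : m < pvK i := by
  have h1 : (1:Int) ≤ 2 ^ m := one_le_pow₀ (by norm_num)
  have hi : 1 < i := lt_of_le_of_lt h1 h
  unfold pvK
  rw [if_pos hi]
  have hlt := PySem.Int.lt_two_pow_bitLength (i - 1)
  have habs : ((i - 1).natAbs : Int) = i - 1 := by omega
  have hcast : ((2 ^ m : Nat) : Int) = (2:Int) ^ m := by push_cast; ring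
  have : (2 ^ m : Nat) ≤ (i - 1).natAbs := by omega
  have : (2 ^ m : Nat) < 2 ^ PySem.Int.bitLength (i - 1) := lt_of_le_of_lt this hlt
  exact (Nat.pow_lt_pow_iff_right (by norm_num)).mp this

-- the doubling loop computes k = pvK i, counting from j = 2^m with enough fuel
lemma pvLoopA_eq (fuel : Nat) : ∀ (m : Nat) (i k : Int), i ≤ 2 ^ m + fuel →
    pvLoopA fuel i ((2:Int) ^ m) k = k + ((pvK i - m : Nat) : Int) := by
  induction fuel with
  | zero =>
    intro m i k h
    have hle : pvK i ≤ m := pvK_le i m (by exact_mod_cast (by simpa using h))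
    simp [pvLoopA]
    omega
  | succ fuel ih =>
    intro m i k h
    simp only [pvLoopA]
    split
    · rename_i hlt
      have hstep : (2:Int) ^ m * 2 = (2:Int) ^ (m+1) := by ring
      rw [hstep]
      have h1 : (1:Int) ≤ 2 ^ m := one_le_pow₀ (by norm_num)
      have hcond : i ≤ 2 ^ (m+1) + fuel := by
        have : (2:Int) ^ (m+1) = 2 ^ m * 2 := by ring
        omega
      rw [ih (m+1) i (k+1) hcond]
      have hgt : m < pvK i := pvK_gt i m hlt
      omega
    · rename_i hnlt
      have hle : pvK i ≤ m := pvK_le i m (by omega)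
      have : pvK i - m = 0 := by omega
      rw [this]; simp

-- the reversed comprehension is the ascending range of exponents k-n-1 .. k-2, mapped through pvPow2
lemma pvRev_eq (nn : Nat) (k : Int) :
    ((PySem.List.pyRange 0 (nn : Int) 1).map (fun j => pvPow2 (k - j - 2))).reverse
      = (PySem.List.pyRange (k - nn - 1) (k - 1) 1).map pvPow2 := by
  induction nn with
  | zero =>
    simp [PySem.List.pyRange_one_eq_nil]
  | succ nn ih =>
    have hcast : ((nn + 1 : Nat) : Int) = (nn : Int) + 1 := by push_cast; ring
    rw [hcast, PySem.List.pyRange_one_succ_right (by positivity)]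
    rw [List.map_append, List.reverse_append]
    simp only [List.map_cons, List.map_nil, List.reverse_cons, List.reverse_nil, List.nil_append,
      List.cons_append]
    rw [ih]
    have hlt : k - ((nn : Int) + 1) - 1 < k - 1 := by omega
    rw [PySem.List.pyRange_one_cons hlt, List.map_cons]
    have he1 : k - (nn : Int) - 2 = k - ((nn : Int) + 1) - 1 := by ring
    have he2 : k - ((nn : Int) + 1) - 1 + 1 = k - (nn : Int) - 1 := by ring
    rw [he1, he2]

-- filtering `> 1` through pvPow2 keeps exactly the exponents ≥ 1
lemma pvFilter_eq (d : Nat) : ∀ (a b : Int), (b - a).toNat = d →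
    ((PySem.List.pyRange a b 1).map pvPow2).filter (fun t => decide (1 < t))
      = (PySem.List.pyRange (max 1 a) b 1).map (fun e => 2 ^ e.toNat) := by
  induction d with
  | zero =>
    intro a b hd
    have hba : b ≤ a := by omega
    rw [PySem.List.pyRange_one_eq_nil hba, PySem.List.pyRange_one_eq_nil (by omega : b ≤ max 1 a)]
    simp
  | succ d ih =>
    intro a b hd
    have hab : a < b := by omega
    rw [PySem.List.pyRange_one_cons hab, List.map_cons, List.filter_cons]
    by_cases ha : 1 ≤ a
    · have hpos : pvPow2 a = 2 ^ a.toNat := by unfold pvPow2; rw [if_pos (by omega)]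
      have h1 : (1:Int) < 2 ^ a.toNat := by
        calc (1:Int) < 2 ^ 1 := by norm_num
        _ ≤ 2 ^ a.toNat := pow_le_pow_right₀ (by norm_num) (by omega)
      rw [hpos, if_pos (by simpa using h1)]
      rw [ih (a+1) b (by omega)]
      have hm1 : max 1 a = a := by omega
      have hm2 : max 1 (a+1) = a + 1 := by omega
      rw [hm1, hm2, PySem.List.pyRange_one_cons hab, List.map_cons]
    · have hle : pvPow2 a ≤ 1 := by
        unfold pvPow2
        split
        · rename_i h0
          have : a.toNat = 0 := by omega
          rw [this]; norm_num
        · norm_num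
      rw [if_neg (by simpa using not_lt.mpr hle)]
      rw [ih (a+1) b (by omega)]
      have : max 1 a = 1 := by omega
      rw [this]
      have : max 1 (a+1) = 1 := by omega
      rw [this]

-- ===== VERDICT (by name: the statement is the Claim_ definition above) =====
theorem get_exponential_deltas_spec : Claim_equal_get_exponential_deltas := by
  intro start stop n _
  unfold Spec_get_exponential_deltas get_exponential_deltas get_exponential_deltas_alt
  set i := stop - start with hi
  have hloop : pvLoopA (i.toNat + 1) i 1 0 = ((pvK i : Nat) : Int) := by
    have h1 : (1:Int) = (2:Int) ^ 0 := by norm_num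
    rw [h1, pvLoopA_eq (i.toNat + 1) 0 i 0 (by omega)]
    simp
  have hk : (if 1 < i then (PySem.Int.bitLength (i - 1) : Int) else 0) = ((pvK i : Nat) : Int) := by
    unfold pvK; split <;> simp
  simp only [hloop, hk]
  by_cases hn : 0 < n
  · have hnn : n = ((n.toNat : Nat) : Int) := by omega
    rw [hnn, pvRev_eq n.toNat ((pvK i : Nat) : Int)]
    exact pvFilter_eq ((((pvK i : Nat) : Int) - 1) - (((pvK i : Nat) : Int) - (n.toNat : Int) - 1)).toNat _ _ rfl
  · rw [PySem.List.pyRange_one_eq_nil (by omega : n ≤ 0),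
        PySem.List.pyRange_one_eq_nil (by omega : ((pvK i : Nat) : Int) - 1 ≤ max 1 (((pvK i : Nat) : Int) - n - 1))]
    simp
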